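-- pv_equiv track=rewrite | github.com/CarterCribbs/CS101 | Projects/P5 - Clever Hangman/CleverHangman.py | createDisplayString
-- ===== SOURCE A (Python) =====
-- def createDisplayString(lettersGuessed, missesLeft, hangmanWord):
--     '''
--     Creates the string that will be displayed to the user, using the information in the parameters.
--     '''
--     lettersnotguessedlist = ["a","b","c","d","e","f","g","h","i","j","k","l","m","n","o","p","q","r","s","t","u","v","w","x","y","z"]
--     hangmanwordstring = ""
--
--     for item in lettersGuessed:
--         if item in lettersnotguessedlist:
--             itemindex = lettersnotguessedlist.index(item)
--             lettersnotguessedlist[itemindex] = " "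
--     lettersnotguessedstring = "".join(lettersnotguessedlist)
--     for item in hangmanWord:
--         hangmanwordstring += item + " "
--
--     return "letters not yet guessed: " + str(lettersnotguessedstring) + "\nmisses remaining = " + str(
--         missesLeft) + "\n" + str(hangmanwordstring) + "\n"
-- ===== SOURCE B (Python) =====
-- ALPHABET = "abcdefghijklmnopqrstuvwxyz"
--
-- def createDisplayString(lettersGuessed, missesLeft, hangmanWord):
--     guessed = set(lettersGuessed)
--     notGuessed = "".join(" " if c in guessed else c for c in ALPHABET)
--     spaced = "".join(c + " " for c in hangmanWord)
--     return ("letters not yet guessed: " + notGuessed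
--             + "\nmisses remaining = " + str(missesLeft)
--             + "\n" + spaced + "\n")
-- ===== Notes on version B (the rewrite author's own statement) =====
-- stated objective: simpler
-- what changed: Instead of mutating a 26-element alphabet list via a per-item membership test plus .index scan for each guessed letter, B snapshots the guesses into a set once and emits the display by a single map over the fixed alphabet (blank iff guessed), plus a join for the spaced word.
import Mathlib
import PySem

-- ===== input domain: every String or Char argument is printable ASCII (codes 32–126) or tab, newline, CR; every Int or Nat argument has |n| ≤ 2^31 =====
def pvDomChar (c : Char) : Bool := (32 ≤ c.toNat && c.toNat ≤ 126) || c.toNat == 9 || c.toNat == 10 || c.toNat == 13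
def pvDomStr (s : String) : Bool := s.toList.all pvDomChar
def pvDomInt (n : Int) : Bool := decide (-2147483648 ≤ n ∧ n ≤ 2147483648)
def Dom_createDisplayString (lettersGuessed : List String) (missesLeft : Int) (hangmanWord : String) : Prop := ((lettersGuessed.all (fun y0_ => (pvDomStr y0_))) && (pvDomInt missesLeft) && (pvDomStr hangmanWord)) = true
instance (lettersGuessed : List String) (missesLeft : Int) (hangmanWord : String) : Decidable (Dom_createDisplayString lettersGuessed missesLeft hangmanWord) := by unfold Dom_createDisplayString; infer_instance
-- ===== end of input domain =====

-- B replaces A's list mutation via membership test + .index per guessed letter with one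
-- set snapshot of the guesses and a single map over the fixed alphabet (objective: simpler).

-- ===== PORT A =====
def pvAlphabet : List String := ["a","b","c","d","e","f","g","h","i","j","k","l","m","n","o","p","q","r","s","t","u","v","w","x","y","z"]

-- one iteration of A's first loop: 'if item in lst: lst[lst.index(item)] = " "'
def pvStep (l : List String) (item : String) : List String :=
  if l.contains item then
    match PySem.List.index? l item with
    | some i => l.set i " "
    | none => l
  else l

def createDisplayString (lettersGuessed : List String) (missesLeft : Int) (hangmanWord : String) : String :=
  let lst := lettersGuessed.foldl pvStep pvAlphabet
  let lettersnotguessedstring := PySem.Str.join "" lst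
  let hangmanwordstring := hangmanWord.toList.foldl (fun acc c => acc ++ String.singleton c ++ " ") ""
  "letters not yet guessed: " ++ lettersnotguessedstring ++ "\nmisses remaining = " ++
    PySem.Int.toStr missesLeft ++ "\n" ++ hangmanwordstring ++ "\n"

-- ===== PORT B =====
def pvAlphaChars : List Char := "abcdefghijklmnopqrstuvwxyz".toList

def createDisplayString_alt (lettersGuessed : List String) (missesLeft : Int) (hangmanWord : String) : String :=
  let guessed := PySem.Set.ofList lettersGuessed
  let notGuessed := String.ofList (pvAlphaChars.map (fun c => if guessed.contains (String.singleton c) then ' ' else c))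
  let spaced := String.ofList (hangmanWord.toList.flatMap (fun c => [c, ' ']))
  "letters not yet guessed: " ++ notGuessed ++ "\nmisses remaining = " ++
    PySem.Int.toStr missesLeft ++ "\n" ++ spaced ++ "\n"

-- ===== PRECONDITION & SPEC =====
def Spec_createDisplayString (lettersGuessed : List String) (missesLeft : Int) (hangmanWord : String) (out : String) : Prop := out = createDisplayString_alt lettersGuessed missesLeft hangmanWord
instance (lettersGuessed : List String) (missesLeft : Int) (hangmanWord : String) (out : String) : Decidable (Spec_createDisplayString lettersGuessed missesLeft hangmanWord out) := by unfold Spec_createDisplayString; infer_instance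

-- ===== CLAIM (what is proved, stated in full; the proofs are below) =====
def Claim_equal_createDisplayString : Prop := ∀ (lettersGuessed : List String) (missesLeft : Int) (hangmanWord : String), Dom_createDisplayString lettersGuessed missesLeft hangmanWord → Spec_createDisplayString lettersGuessed missesLeft hangmanWord (createDisplayString lettersGuessed missesLeft hangmanWord)

-- ===== LEMMAS AND PROOFS =====

-- position a in A is blanked iff a has been guessed
def pvBlank (p : List String) (a : String) : String := if p.contains a then " " else a

lemma pvStep_pos {l : List String} {g : String} {k : Nat}
    (hc : l.contains g = true) (hk : PySem.List.index? l g = some k) :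
    pvStep l g = l.set k " " := by
  unfold pvStep; rw [hc, hk]; rfl

lemma pvStep_neg {l : List String} {g : String} (hc : l.contains g = false) :
    pvStep l g = l := by
  unfold pvStep; rw [hc]; rfl

lemma pvBlank_append_of_ne {p : List String} {x g : String} (h : pvBlank p x ≠ g) :
    pvBlank (p ++ [g]) x = pvBlank p x := by
  by_cases hpx : x ∈ p
  · simp [pvBlank, hpx]
  · have hx : x ≠ g := by simpa [pvBlank, hpx] using h
    simp [pvBlank, hpx, hx]

lemma pvStep_map : ∀ (A : List String), A.Nodup → (" " : String) ∉ A → ∀ (p : List String) (g : String),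
    pvStep (A.map (pvBlank p)) g = A.map (pvBlank (p ++ [g])) := by
  intro A
  induction A with
  | nil =>
    intro _ _ p g
    exact pvStep_neg (by simp)
  | cons a A ih =>
    intro hnd hsp p g
    simp only [List.nodup_cons] at hnd
    simp only [List.mem_cons, not_or] at hsp
    obtain ⟨hna, hndA⟩ := hnd
    obtain ⟨hsa, hsA⟩ := hsp
    by_cases hag : pvBlank p a = g
    · -- head of the mapped list equals g: A blanks exactly this slot (a no-op if it is already " ")
      have hg' : g = a ∨ g = " " := by
        by_cases hpa : a ∈ p
        · right; simpa [pvBlank, hpa] using hag.symm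
        · left; simpa [pvBlank, hpa] using hag.symm
      have hxg : ∀ x ∈ A, pvBlank (p ++ [g]) x = pvBlank p x := by
        intro x hx
        have hxa : x ≠ a := fun h => hna (h ▸ hx)
        have hxs : x ≠ " " := fun h => hsA (h ▸ hx)
        have hxg' : x ≠ g := by
          rcases hg' with h | h
          · exact h ▸ hxa
          · exact h ▸ hxs
        by_cases hpx : x ∈ p
        · simp [pvBlank, hpx]
        · simp [pvBlank, hpx, hxg']
      have hhead : pvBlank (p ++ [g]) a = " " := by
        by_cases hpa : a ∈ p
        · simp [pvBlank, hpa]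
        · have : a = g := by simpa [pvBlank, hpa] using hag
          simp [pvBlank, this]
      have hset : pvStep ((a :: A).map (pvBlank p)) g = " " :: A.map (pvBlank p) := by
        rw [List.map_cons, hag]
        rw [pvStep_pos (by simp) (PySem.List.index?_cons_self g (A.map (pvBlank p)))]
        rfl
      rw [hset, List.map_cons, hhead, List.map_congr_left hxg]
    · -- head does not match: the loop acts only on the tail
      by_cases hct : g ∈ A.map (pvBlank p)
      · obtain ⟨k, hk⟩ := Option.isSome_iff_exists.mp
          ((PySem.List.index?_isSome_iff (A.map (pvBlank p)) g).2 hct)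
        have hidx : PySem.List.index? ((a :: A).map (pvBlank p)) g = some (k + 1) := by
          rw [List.map_cons, PySem.List.index?_cons_of_ne _ hag, hk]; rfl
        have hcon : ((a :: A).map (pvBlank p)).contains g = true := by
          simp only [List.map_cons, List.contains_cons]
          simp [hct]
        have htail : pvStep (A.map (pvBlank p)) g =
            (A.map (pvBlank p)).set k " " :=
          pvStep_pos (by simp [hct]) hk
        have hih := ih hndA hsA p g
        rw [htail] at hih
        calc pvStep ((a :: A).map (pvBlank p)) g
            = pvBlank p a :: (A.map (pvBlank p)).set k " " := by
              rw [pvStep_pos hcon hidx, List.map_cons, List.set_cons_succ]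
          _ = pvBlank p a :: A.map (pvBlank (p ++ [g])) := by rw [hih]
          _ = (a :: A).map (pvBlank (p ++ [g])) := by
              rw [List.map_cons, pvBlank_append_of_ne hag]
      · -- g nowhere in the list: no element changes
        have hnot : ∀ x ∈ A, pvBlank p x ≠ g := by
          intro x hx h
          exact hct (List.mem_map.mpr ⟨x, hx, h⟩)
        have hcon : ((a :: A).map (pvBlank p)).contains g = false := by
          simp only [List.map_cons, List.contains_cons]
          simp only [Bool.or_eq_false_iff, beq_eq_false_iff_ne, ne_eq]
          exact ⟨fun h => hag h.symm, by simpa using hct⟩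
        rw [pvStep_neg hcon]
        apply List.map_congr_left
        intro x hx
        rcases List.mem_cons.mp hx with h | h
        · exact (pvBlank_append_of_ne (h ▸ hag)).symm
        · exact (pvBlank_append_of_ne (hnot x h)).symm

lemma pvFold_map (A : List String) (hnd : A.Nodup) (hsp : (" " : String) ∉ A) :
    ∀ (gs p : List String), gs.foldl pvStep (A.map (pvBlank p)) = A.map (pvBlank (p ++ gs)) := by
  intro gs
  induction gs with
  | nil => intro p; simp
  | cons g gs ih =>
    intro p
    rw [List.foldl_cons, pvStep_map A hnd hsp p g, ih (p ++ [g])]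
    simp

lemma pvFoldA (gs : List String) : gs.foldl pvStep pvAlphabet = pvAlphabet.map (pvBlank gs) := by
  have h0 : List.map (pvBlank []) pvAlphabet = pvAlphabet := by decide
  calc gs.foldl pvStep pvAlphabet
      = gs.foldl pvStep (List.map (pvBlank []) pvAlphabet) := by rw [h0]
    _ = pvAlphabet.map (pvBlank ([] ++ gs)) := pvFold_map _ (by decide) (by decide) gs []
    _ = pvAlphabet.map (pvBlank gs) := by rw [List.nil_append]

lemma pvLetters_eq (gs : List String) :
    (PySem.Str.join "" (gs.foldl pvStep pvAlphabet)).toList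
      = pvAlphaChars.map (fun c => if (PySem.Set.ofList gs).contains (String.singleton c) then ' ' else c) := by
  rw [pvFoldA]
  have halpha : pvAlphabet = pvAlphaChars.map String.singleton := by decide
  rw [halpha, List.map_map, PySem.Str.toList_join, List.map_map]
  have hmap : pvAlphaChars.map (String.toList ∘ pvBlank gs ∘ String.singleton)
      = (pvAlphaChars.map (fun c => if (PySem.Set.ofList gs).contains (String.singleton c) then ' ' else c)).map (fun c => [c]) := by
    rw [List.map_map]
    apply List.map_congr_left
    intro c _
    by_cases h : String.singleton c ∈ gs
    · have h1 : (PySem.Set.ofList gs).contains (String.singleton c) = true := by simp [h]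
      have h2 : pvBlank gs (String.singleton c) = " " := by simp [pvBlank, h]
      simp only [Function.comp_apply, h1, h2, if_true]
      decide
    · have h1 : (PySem.Set.ofList gs).contains (String.singleton c) = false := by simp [h]
      have h2 : pvBlank gs (String.singleton c) = String.singleton c := by simp [pvBlank, h]
      simp [h, h2]
  rw [hmap, show ("" : String).toList = [] from rfl]
  exact PySem.Chars.join_nil_singletons _

lemma pvHang (cs : List Char) : ∀ acc : String,
    (cs.foldl (fun s c => s ++ String.singleton c ++ " ") acc).toList
      = acc.toList ++ cs.flatMap (fun c => [c, ' ']) := by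
  induction cs with
  | nil => intro acc; simp
  | cons c cs ih =>
    intro acc
    rw [List.foldl_cons, ih]
    simp

-- ===== VERDICT (by name: the statement is the Claim_ definition above) =====
theorem createDisplayString_spec : Claim_equal_createDisplayString := by
  intro gs m w _
  unfold Spec_createDisplayString createDisplayString createDisplayString_alt
  apply String.toList_inj.mp
  simp only [String.toList_append, pvLetters_eq, pvHang, String.toList_ofList]
  rfl
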